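-- pv_equiv track=rewrite | github.com/ffancer/study_with_codewars | 7 kyu Parts of a list.py | partlist
-- ===== SOURCE A (Python) =====
-- def partlist(arr):
--     lst = []
--     i = 0
--
--     while i < len(arr):
--         first = ' '.join(arr[:i+1])
--         second = ' '.join(arr[i+1:])
--         tpl = first, second
--         lst.append(tpl)
--         i += 1
--
--     return lst
-- ===== SOURCE B (Python) =====
-- def partlist(arr):
--     # Single forward pass maintaining running prefix/suffix join-strings,
--     # instead of re-slicing and re-joining the whole list at every index.
--     if not arr:
--         return []
--     prefix = arr[0]
--     suffix = ' '.join(arr[1:])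
--     out = [(prefix, suffix)]
--     for w in arr[1:]:
--         prefix = prefix + ' ' + w
--         suffix = suffix[len(w) + 1:]
--         out.append((prefix, suffix))
--     return out
-- ===== Notes on version B (the rewrite author's own statement) =====
-- stated objective: alternative
-- what changed: Replaces the per-index re-slicing and re-joining of the whole list with a single forward pass that carries running prefix/suffix join-strings, extending the prefix and chopping the consumed word off the suffix at each step (the output itself is quadratic in size, so total cost stays dominated by it).
import Mathlib
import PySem

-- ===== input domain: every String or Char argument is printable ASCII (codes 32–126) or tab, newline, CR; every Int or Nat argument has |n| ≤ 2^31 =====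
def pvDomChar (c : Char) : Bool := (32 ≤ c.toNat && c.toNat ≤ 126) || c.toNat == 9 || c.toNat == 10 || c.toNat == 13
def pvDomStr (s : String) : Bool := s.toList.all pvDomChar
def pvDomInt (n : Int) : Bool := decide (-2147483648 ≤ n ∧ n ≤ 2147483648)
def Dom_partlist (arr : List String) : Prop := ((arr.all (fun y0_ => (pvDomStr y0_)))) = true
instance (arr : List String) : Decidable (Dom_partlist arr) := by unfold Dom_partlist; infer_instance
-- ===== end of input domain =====

-- B replaces A's per-index re-slicing/re-joining with one forward pass carrying running
-- prefix/suffix join-strings (objective: alternative decomposition; no repeated full joins).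


-- ===== PORT A =====
-- while i < len(arr): append ((' '.join(arr[:i+1]), ' '.join(arr[i+1:]))); i += 1
def partlist (arr : List String) : List (String × String) :=
  (PySem.List.pyRange 0 (arr.length : Int)).foldl
    (fun lst i =>
      let first := PySem.Str.join " " (PySem.List.slice arr none (some (i + 1)))
      let second := PySem.Str.join " " (PySem.List.slice arr (some (i + 1)) none)
      lst ++ [(first, second)])
    []

-- ===== PORT B =====
-- single pass: start from (arr[0], ' '.join(arr[1:])), then extend prefix / chop suffix
def partlist_alt (arr : List String) : List (String × String) :=
  match arr with
  | [] => []
  | w0 :: rest =>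
    let suffix0 := PySem.Str.join " " rest
    (rest.foldl
      (fun (st : List (String × String) × String × String) w =>
        let pre := st.2.1 ++ " " ++ w
        let suf := PySem.Str.slice st.2.2 (some (PySem.Str.len w + 1)) none
        (st.1 ++ [(pre, suf)], pre, suf))
      ([(w0, suffix0)], w0, suffix0)).1

-- ===== PRECONDITION & SPEC =====
def Spec_partlist (arr : List String) (out : List (String × String)) : Prop := out = partlist_alt arr
instance (arr : List String) (out : List (String × String)) : Decidable (Spec_partlist arr out) := by unfold Spec_partlist; infer_instance

-- ===== CLAIM (what is proved, stated in full; the proofs are below) =====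
def Claim_equal_partlist : Prop := ∀ (arr : List String), Dom_partlist arr → Spec_partlist arr (partlist arr)

-- ===== LEMMAS AND PROOFS =====

-- canonical description both ports are reduced to
def pvJ (xs : List String) : String := PySem.Str.join " " xs

def pvCanon (arr : List String) : List (String × String) :=
  (List.range arr.length).map (fun i => (pvJ (arr.take (i + 1)), pvJ (arr.drop (i + 1))))

theorem pv_foldl_push {α β : Type} (l : List α) (f : α → β) (init : List β) :
    l.foldl (fun acc x => acc ++ [f x]) init = init ++ l.map f := by
  induction l generalizing init with
  | nil => simp
  | cons x xs ih => simp [List.foldl, ih, List.append_assoc]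

theorem pv_pyRange_map (n : Nat) :
    PySem.List.pyRange 0 (n : Int) = (List.range n).map (fun i : Nat => (i : Int)) := by
  suffices h : ∀ (k a : Nat), PySem.List.pyRange (a : Int) ((a + k : Nat) : Int)
      = (List.range k).map (fun i => ((a + i : Nat) : Int)) by
    have h0 := h n 0
    simp only [Nat.zero_add, Nat.cast_zero] at h0
    exact h0
  intro k
  induction k with
  | zero => intro a; simp [PySem.List.pyRange]
  | succ m ih =>
    intro a
    rw [PySem.List.pyRange_one_cons (by push_cast; omega)]
    have h1 : ((a : Int) + 1) = ((a + 1 : Nat) : Int) := by push_cast; ring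
    have h2 : ((a + (m + 1) : Nat) : Int) = (((a + 1) + m : Nat) : Int) := by push_cast; ring
    rw [h1, h2, ih (a + 1), List.range_succ_eq_map, List.map_cons, List.map_map]
    refine List.cons_eq_cons.mpr ⟨by push_cast; ring, ?_⟩
    apply List.map_congr_left
    intro i _
    simp only [Function.comp_apply]
    push_cast
    ring

-- A computes the canonical list
theorem pv_A_eq_canon (arr : List String) : partlist arr = pvCanon arr := by
  unfold partlist pvCanon
  rw [pv_pyRange_map, pv_foldl_push, List.nil_append, List.map_map]
  apply List.map_congr_left
  intro i _
  simp only [Function.comp_apply]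
  have h1 : ((i : Int) + 1) = ((i + 1 : Nat) : Int) := by push_cast; ring
  rw [h1, PySem.List.slice_to_natCast, PySem.List.slice_from_natCast]
  rfl

-- join of a snoc with nonempty front
theorem pv_chars_join_snoc (sep : List Char) (xs : List (List Char)) (w : List Char)
    (h : xs ≠ []) :
    PySem.Chars.join sep (xs ++ [w]) = PySem.Chars.join sep xs ++ sep ++ w := by
  induction xs with
  | nil => exact absurd rfl h
  | cons x xs ih =>
    cases xs with
    | nil => simp [PySem.Chars.join_cons_cons, PySem.Chars.join_singleton]
    | cons y ys =>
      have h1 : (x :: y :: ys) ++ [w] = x :: ((y :: ys) ++ [w]) := rfl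
      have h2 : (y :: ys) ++ [w] = y :: (ys ++ [w]) := rfl
      rw [h1, h2, PySem.Chars.join_cons_cons, ← h2, ih (by simp),
        PySem.Chars.join_cons_cons]
      simp [List.append_assoc]

theorem pv_join_snoc (xs : List String) (w : String) (h : xs ≠ []) :
    pvJ (xs ++ [w]) = pvJ xs ++ " " ++ w := by
  apply String.toList_inj.mp
  simp only [pvJ, PySem.Str.toList_join, String.toList_append, PySem.Str.toList_join,
    List.map_append, List.map_cons, List.map_nil]
  exact pv_chars_join_snoc _ _ _ (by simpa using h)

-- chopping the first word plus separator off a join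
theorem pv_chars_join_drop (w : List Char) (rs : List (List Char)) :
    (PySem.Chars.join [' '] (w :: rs)).drop (w.length + 1) = PySem.Chars.join [' '] rs := by
  cases rs with
  | nil =>
    rw [PySem.Chars.join_singleton, PySem.Chars.join_nil]
    exact List.drop_eq_nil_of_le (by omega)
  | cons r rs' =>
    rw [PySem.Chars.join_cons_cons, List.append_assoc]
    simp

theorem pv_suffix_chop (w : String) (rs : List String) :
    PySem.Str.slice (pvJ (w :: rs)) (some (PySem.Str.len w + 1)) none = pvJ rs := by
  apply String.toList_inj.mp
  rw [PySem.Str.toList_slice]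
  have hlen : PySem.Str.len w + 1 = ((w.toList.length + 1 : Nat) : Int) := by
    simp [PySem.Str.len]
  rw [hlen]
  simp only [PySem.Chars.slice_eq_listSlice, PySem.List.slice_from_natCast]
  simp only [pvJ, PySem.Str.toList_join, List.map_cons]
  have : (" " : String).toList = [' '] := rfl
  rw [this]
  exact pv_chars_join_drop _ _

theorem pv_join_singleton (w : String) : pvJ [w] = w := by
  apply String.toList_inj.mp
  simp [pvJ, PySem.Str.toList_join, PySem.Chars.join_singleton]

-- the loop invariant of B's single pass
theorem pv_B_inv (rest : List String) :
    ∀ (done : List String) (out0 : List (String × String)), done ≠ [] →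
    (rest.foldl
      (fun (st : List (String × String) × String × String) w =>
        let pre := st.2.1 ++ " " ++ w
        let suf := PySem.Str.slice st.2.2 (some (PySem.Str.len w + 1)) none
        (st.1 ++ [(pre, suf)], pre, suf))
      (out0, pvJ done, pvJ rest)).1
    = out0 ++ (List.range rest.length).map
        (fun i => (pvJ (done ++ rest.take (i + 1)), pvJ (rest.drop (i + 1)))) := by
  induction rest with
  | nil => intro done out0 _; simp
  | cons w rs ih =>
    intro done out0 hd
    have hpre : pvJ done ++ " " ++ w = pvJ (done ++ [w]) := (pv_join_snoc done w hd).symm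
    have hsuf : PySem.Str.slice (pvJ (w :: rs)) (some (PySem.Str.len w + 1)) none = pvJ rs :=
      pv_suffix_chop w rs
    simp only [List.foldl_cons, hpre, hsuf]
    rw [ih (done ++ [w]) _ (by simp)]
    rw [List.append_assoc]
    congr 1
    rw [List.length_cons, List.range_succ_eq_map, List.map_cons, List.map_map,
      List.singleton_append]
    refine List.cons_eq_cons.mpr ⟨by simp, ?_⟩
    apply List.map_congr_left
    intro i _
    simp [Function.comp, List.append_assoc]

-- B computes the canonical list
theorem pv_B_eq_canon (arr : List String) : partlist_alt arr = pvCanon arr := by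
  unfold partlist_alt pvCanon
  cases arr with
  | nil => simp
  | cons w0 rest =>
    show (rest.foldl
        (fun (st : List (String × String) × String × String) w =>
          let pre := st.2.1 ++ " " ++ w
          let suf := PySem.Str.slice st.2.2 (some (PySem.Str.len w + 1)) none
          (st.1 ++ [(pre, suf)], pre, suf))
        ([(w0, PySem.Str.join " " rest)], w0, PySem.Str.join " " rest)).1 = _
    rw [show ([(w0, PySem.Str.join " " rest)], w0, PySem.Str.join " " rest)
        = ([(w0, pvJ rest)], pvJ [w0], pvJ rest) from by rw [pv_join_singleton]; rfl]
    rw [pv_B_inv rest [w0] [(w0, pvJ rest)] (by simp)]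
    rw [List.length_cons, List.range_succ_eq_map, List.map_cons, List.map_map,
      List.singleton_append]
    refine List.cons_eq_cons.mpr ⟨by simp [pv_join_singleton], ?_⟩
    apply List.map_congr_left
    intro i _
    simp [Function.comp]

-- ===== VERDICT (by name: the statement is the Claim_ definition above) =====
theorem partlist_spec : Claim_equal_partlist := by
  intro arr _
  unfold Spec_partlist
  rw [pv_A_eq_canon, pv_B_eq_canon]
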